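-- pv_equiv track=rewrite | github.com/sp-chuck/ICS-heterogeneous-graph | DataPreprocess_new.py | make_snapshot_ranges
-- ===== SOURCE A (Python) =====
-- from typing import Any, Dict, List, Optional, Tuple
--
-- def make_snapshot_ranges(
--     n_rows: int,
--     window: int,
--     stride: int,
--     max_snapshots: int = 0,
-- ) -> List[Tuple[int, int]]:
--     if window <= 0 or stride <= 0:
--         raise ValueError("temporal_window and temporal_stride must be positive")
--     if n_rows < window:
--         return []
--
--     ranges = []
--     start = 0
--     while start + window <= n_rows:
--         ranges.append((start, start + window))
--         if max_snapshots > 0 and len(ranges) >= max_snapshots: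
--             break
--         start += stride
--     return ranges
-- ===== SOURCE B (Python) =====
-- def make_snapshot_ranges(n_rows, window, stride, max_snapshots=0):
--     if window <= 0 or stride <= 0:
--         raise ValueError("temporal_window and temporal_stride must be positive")
--     count = (n_rows - window) // stride + 1
--     if max_snapshots > 0:
--         count = min(count, max_snapshots)
--     return [(i * stride, i * stride + window) for i in range(count)]
-- ===== Notes on version B (the rewrite author's own statement) =====
-- stated objective: simpler
-- what changed: Replaced the while loop with a pointer and length-checked break by a closed-form snapshot count ((n_rows-window)//stride + 1, clamped by max_snapshots) and a range comprehension.
import Mathlib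
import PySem

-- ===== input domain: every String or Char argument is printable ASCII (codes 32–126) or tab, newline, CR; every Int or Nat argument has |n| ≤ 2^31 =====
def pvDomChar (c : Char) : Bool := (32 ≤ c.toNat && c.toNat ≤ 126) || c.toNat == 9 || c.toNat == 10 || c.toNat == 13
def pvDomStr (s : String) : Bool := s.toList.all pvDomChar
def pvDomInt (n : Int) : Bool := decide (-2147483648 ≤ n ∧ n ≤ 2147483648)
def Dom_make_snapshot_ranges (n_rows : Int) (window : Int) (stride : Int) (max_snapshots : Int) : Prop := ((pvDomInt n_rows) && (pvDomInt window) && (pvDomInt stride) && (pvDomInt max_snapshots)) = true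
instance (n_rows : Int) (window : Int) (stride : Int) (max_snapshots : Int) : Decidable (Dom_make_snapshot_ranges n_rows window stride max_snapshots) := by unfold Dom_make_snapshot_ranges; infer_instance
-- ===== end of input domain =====

-- B replaces A's while loop (start pointer + length-checked break) by a closed-form
-- snapshot count clamped with max_snapshots and a range comprehension; objective: simpler.

-- ===== PORT A =====
-- the while loop of A; the '0 < stride' conjunct in the guard is only a totality guard
-- (A raises before reaching the loop when stride ≤ 0, and Pre_ excludes that case)
def pvLoopA (n_rows window stride max_snapshots : Int) (start : Int) (ranges : List (Int × Int)) : List (Int × Int) :=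
  if h : start + window ≤ n_rows ∧ 0 < stride then
    let ranges' := ranges ++ [(start, start + window)]
    if 0 < max_snapshots ∧ max_snapshots ≤ (ranges'.length : Int) then ranges'
    else pvLoopA n_rows window stride max_snapshots (start + stride) ranges'
  else ranges
termination_by (n_rows - window - start + 1).toNat
decreasing_by omega

def make_snapshot_ranges (n_rows : Int) (window : Int) (stride : Int) (max_snapshots : Int) : List (Int × Int) :=
  if window ≤ 0 ∨ stride ≤ 0 then []   -- Python raises ValueError here; excluded by Pre_
  else if n_rows < window then []
  else pvLoopA n_rows window stride max_snapshots 0 []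

-- ===== PORT B =====
-- count = (n_rows - window) // stride + 1, clamped by max_snapshots when positive (Source B's `count`)
def pvCount (n_rows window stride max_snapshots : Int) : Int :=
  if 0 < max_snapshots then min (PySem.Int.floordiv (n_rows - window) stride + 1) max_snapshots
  else PySem.Int.floordiv (n_rows - window) stride + 1

def make_snapshot_ranges_alt (n_rows : Int) (window : Int) (stride : Int) (max_snapshots : Int) : List (Int × Int) :=
  if window ≤ 0 ∨ stride ≤ 0 then []   -- Python raises ValueError here; excluded by Pre_
  else (PySem.List.pyRange 0 (pvCount n_rows window stride max_snapshots) 1).map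
    (fun i => (i * stride, i * stride + window))

-- ===== PRECONDITION & SPEC =====
-- Pre_ excludes exactly the inputs where A raises ValueError (non-positive window or stride)
def Pre_make_snapshot_ranges (n_rows : Int) (window : Int) (stride : Int) (max_snapshots : Int) : Prop :=
  0 < window ∧ 0 < stride
instance (n_rows : Int) (window : Int) (stride : Int) (max_snapshots : Int) : Decidable (Pre_make_snapshot_ranges n_rows window stride max_snapshots) := by unfold Pre_make_snapshot_ranges; infer_instance
def pvWitness_make_snapshot_ranges : Int × Int × Int × Int := (10, 3, 2, 2)

def Spec_make_snapshot_ranges (n_rows : Int) (window : Int) (stride : Int) (max_snapshots : Int) (out : List (Int × Int)) : Prop := out = make_snapshot_ranges_alt n_rows window stride max_snapshots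
instance (n_rows : Int) (window : Int) (stride : Int) (max_snapshots : Int) (out : List (Int × Int)) : Decidable (Spec_make_snapshot_ranges n_rows window stride max_snapshots out) := by unfold Spec_make_snapshot_ranges; infer_instance

-- ===== CLAIM (what is proved, stated in full; the proofs are below) =====
def Claim_equal_make_snapshot_ranges : Prop := ∀ (n_rows : Int) (window : Int) (stride : Int) (max_snapshots : Int), Dom_make_snapshot_ranges n_rows window stride max_snapshots → Pre_make_snapshot_ranges n_rows window stride max_snapshots → Spec_make_snapshot_ranges n_rows window stride max_snapshots (make_snapshot_ranges n_rows window stride max_snapshots)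

-- ===== LEMMAS AND PROOFS =====

-- the accumulated list after k iterations is the first k pairs of B's comprehension
lemma pvBlist_succ (s w : Int) (k : Nat) :
    (PySem.List.pyRange 0 ((k : Int) + 1) 1).map (fun i => (i * s, i * s + w))
      = (PySem.List.pyRange 0 (k : Int) 1).map (fun i => (i * s, i * s + w)) ++ [((k : Int) * s, (k : Int) * s + w)] := by
  rw [PySem.List.pyRange_one_succ_right (by exact_mod_cast Nat.zero_le k)]
  simp

lemma pvLoop_eq (n w s m c : Int) (hs : 0 < s)
    (hc : c = if 0 < m then min (PySem.Int.floordiv (n - w) s + 1) m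
              else PySem.Int.floordiv (n - w) s + 1) :
    ∀ (d k : Nat), c - (k : Int) ≤ d → (k : Int) ≤ c → (0 < m → (k : Int) < m) →
      pvLoopA n w s m ((k : Int) * s) ((PySem.List.pyRange 0 (k : Int) 1).map (fun i => (i * s, i * s + w)))
        = (PySem.List.pyRange 0 c 1).map (fun i => (i * s, i * s + w)) := by
  have hcN : c ≤ PySem.Int.floordiv (n - w) s + 1 := by
    rw [hc]; split <;> omega
  intro d
  induction d with
  | zero =>
    intro k hd hk _
    have hkc : (k : Int) = c := by omega
    rw [pvLoopA]
    have hguard : ¬ ((k : Int) * s + w ≤ n ∧ 0 < s) := by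
      rintro ⟨h1, -⟩
      have : (k : Int) ≤ PySem.Int.floordiv (n - w) s :=
        (PySem.Int.le_floordiv_iff_mul_le hs).mpr (by omega)
      omega
    rw [dif_neg hguard, hkc]
  | succ d ih =>
    intro k hd hk hkm
    rw [pvLoopA]
    by_cases hguard : ((k : Int) * s + w ≤ n ∧ 0 < s)
    · rw [dif_pos hguard]
      have hkN : (k : Int) ≤ PySem.Int.floordiv (n - w) s :=
        (PySem.Int.le_floordiv_iff_mul_le hs).mpr (by omega)
      have hkc : (k : Int) < c := by
        rw [hc]; split
        · have := hkm (by assumption); omega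
        · omega
      have hacc : (PySem.List.pyRange 0 (k : Int) 1).map (fun i => (i * s, i * s + w)) ++ [((k : Int) * s, (k : Int) * s + w)]
          = (PySem.List.pyRange 0 ((k : Int) + 1) 1).map (fun i => (i * s, i * s + w)) :=
        (pvBlist_succ s w k).symm
      simp only [hacc]
      have hlen : (((PySem.List.pyRange 0 ((k : Int) + 1) 1).map (fun i => (i * s, i * s + w))).length : Int) = (k : Int) + 1 := by
        rw [List.length_map, PySem.List.length_pyRange_one]; omega
      by_cases hbrk : 0 < m ∧ m ≤ (k : Int) + 1
      · rw [if_pos (by rw [hlen]; exact hbrk)]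
        have hce : c = (k : Int) + 1 := by
          have := hkm hbrk.1
          rw [hc, if_pos hbrk.1]; omega
        rw [hce]
      · rw [if_neg (by rw [hlen]; exact hbrk)]
        have hstep : (k : Int) * s + s = ((k + 1 : Nat) : Int) * s := by push_cast; ring
        have hcast : ((k : Int) + 1) = ((k + 1 : Nat) : Int) := by push_cast; ring
        rw [hstep, hcast]
        refine ih (k + 1) (by push_cast; omega) (by push_cast; omega) (fun hm => ?_)
        have h1 := hkm hm
        push_cast
        omega
    · rw [dif_neg hguard]
      have hks : ¬ ((k : Int) * s + w ≤ n) := fun hle => hguard ⟨hle, hs⟩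
      have hkN : PySem.Int.floordiv (n - w) s < (k : Int) := by
        by_contra hcon
        push_neg at hcon
        have := (PySem.Int.le_floordiv_iff_mul_le hs).mp hcon
        omega
      have : (k : Int) = c := by omega
      rw [this]

-- ===== VERDICT (by name: the statement is the Claim_ definition above) =====
theorem make_snapshot_ranges_spec : Claim_equal_make_snapshot_ranges := by
  intro n w s m _ hpre
  obtain ⟨hw, hs⟩ := hpre
  unfold Spec_make_snapshot_ranges make_snapshot_ranges make_snapshot_ranges_alt
  rw [if_neg (show ¬ (w ≤ 0 ∨ s ≤ 0) by omega)]
  by_cases hnw : n < w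
  · rw [if_pos hnw]
    have hfd : PySem.Int.floordiv (n - w) s < 0 := by
      rw [PySem.Int.floordiv_lt_iff_lt_mul hs]; omega
    have hle : pvCount n w s m ≤ 0 := by unfold pvCount; split <;> omega
    rw [PySem.List.pyRange_one_eq_nil (by omega)]
    simp
  · rw [if_neg hnw, if_neg (show ¬ (w ≤ 0 ∨ s ≤ 0) by omega)]
    have hfd : 0 ≤ PySem.Int.floordiv (n - w) s := by
      rw [PySem.Int.le_floordiv_iff_mul_le hs]; omega
    have hc0 : 0 < pvCount n w s m := by unfold pvCount; split <;> omega
    have h0 : pvLoopA n w s m 0 [] = pvLoopA n w s m (((0 : Nat) : Int) * s)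
        ((PySem.List.pyRange 0 ((0 : Nat) : Int) 1).map (fun i => (i * s, i * s + w))) := by
      norm_num [PySem.List.pyRange_one_eq_nil]
    rw [h0, pvLoop_eq n w s m (pvCount n w s m) hs (by unfold pvCount; rfl) (pvCount n w s m).toNat 0
      (by push_cast; omega) (by push_cast; omega)
      (fun hm => by have : pvCount n w s m ≤ m := by unfold pvCount; rw [if_pos hm]; omega
                    push_cast; omega)]
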